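-- pv_equiv track=rewrite | github.com/SRINIVASANLVC/LVCMATHIDEAS | phonetics/vowel-direction2.py | apply_merger
-- ===== SOURCE A (Python) =====
-- merger_rules = {
--     ('a','u'): 'o', ('a','i'): 'e',
--     ('u','a'): 'wa', ('u','i'): 'wi', ('u','e'): 'we', ('u','o'): 'wo',
--     ('i','a'): 'ya', ('i','u'): 'yu', ('i','e'): 'ye', ('i','o'): 'yo',
--     ('a','a'): 'A', ('i','i'): 'I', ('u','u'): 'U', ('e','e'): 'E', ('o','o'): 'O'
-- }
--
-- def apply_merger(path):
--     merged = list(path)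
--     i = len(merged) - 2
--     while i >= 0:
--         pair = (merged[i], merged[i+1])
--         if pair in merger_rules:
--             merged[i:i+2] = [merger_rules[pair]]
--         i -= 1
--     return ''.join(merged)
-- ===== SOURCE B (Python) =====
-- merger_rules = {
--     ('a','u'): 'o', ('a','i'): 'e',
--     ('u','a'): 'wa', ('u','i'): 'wi', ('u','e'): 'we', ('u','o'): 'wo',
--     ('i','a'): 'ya', ('i','u'): 'yu', ('i','e'): 'ye', ('i','o'): 'yo',
--     ('a','a'): 'A', ('i','i'): 'I', ('u','u'): 'U', ('e','e'): 'E', ('o','o'): 'O'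
-- }
--
-- def apply_merger(path):
--     # One right-to-left pass over the characters, building the result as a
--     # reversed list of CHARS (not segments): a merge rewrites the top char(s).
--     # Correct because every rule key is a pair of single chars and every
--     # multi-char rule output starts with 'w'/'y', which is never a key's
--     # second component, so matching on the last produced char is exact.
--     rout = []  # characters of the result, in reverse order
--     for c in reversed(path):
--         if rout and (c, rout[-1]) in merger_rules:
--             rout[-1:] = reversed(merger_rules[(c, rout[-1])])
--         else:
--             rout.append(c)
--     return ''.join(reversed(rout))
-- ===== Notes on version B (the rewrite author's own statement) =====
-- stated objective: faster
-- what changed: Replaced the index-walking loop that splices merged pairs into the list of segments in place with a single right-to-left pass that builds the result as a reversed character list, rewriting only its tail on a merge.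
import Mathlib
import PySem

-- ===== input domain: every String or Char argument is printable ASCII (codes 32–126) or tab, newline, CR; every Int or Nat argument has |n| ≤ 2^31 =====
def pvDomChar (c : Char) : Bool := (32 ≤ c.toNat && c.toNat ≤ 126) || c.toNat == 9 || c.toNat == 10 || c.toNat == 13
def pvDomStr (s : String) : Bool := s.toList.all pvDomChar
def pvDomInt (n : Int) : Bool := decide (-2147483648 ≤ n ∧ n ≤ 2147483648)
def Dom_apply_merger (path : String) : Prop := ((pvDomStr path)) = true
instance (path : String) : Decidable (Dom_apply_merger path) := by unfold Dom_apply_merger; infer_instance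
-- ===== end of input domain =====

-- B replaces A's in-place list splicing over string segments by one right-to-left
-- pass building the result as a reversed CHARACTER list (measurably faster, asymptotic).

-- ===== PORT A =====
-- the module-level merger_rules dict as a first-match lookup over pairs of strings
-- ('pair in merger_rules' + 'merger_rules[pair]' = some/none), in insertion order
def mergerRules (p : String × String) : Option String :=
  if p = ("a","u") then some "o" else if p = ("a","i") then some "e"
  else if p = ("u","a") then some "wa" else if p = ("u","i") then some "wi"
  else if p = ("u","e") then some "we" else if p = ("u","o") then some "wo"
  else if p = ("i","a") then some "ya" else if p = ("i","u") then some "yu"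
  else if p = ("i","e") then some "ye" else if p = ("i","o") then some "yo"
  else if p = ("a","a") then some "A" else if p = ("i","i") then some "I"
  else if p = ("u","u") then some "U" else if p = ("e","e") then some "E"
  else if p = ("o","o") then some "O" else none

-- one iteration of A's while body at index i (both indices are always in range on the states
-- the loop reaches, so merged[i] / merged[i+1] are ported with getD; merged[i:i+2] = [m] is take/drop)
def stepA (merged : List String) (i : Nat) : List String :=
  match mergerRules (merged.getD i "", merged.getD (i+1) "") with
  | some m => merged.take i ++ [m] ++ merged.drop (i+2)
  | none   => merged

-- A's while loop: runs the body at index i, then i-1, …, then 0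
def loopA (merged : List String) : Nat → List String
  | 0 => stepA merged 0
  | Nat.succ i => loopA (stepA merged (i+1)) i

def apply_merger (path : String) : String :=
  let merged := path.toList.map String.singleton   -- list(path)
  String.join (if merged.length < 2 then merged else loopA merged (merged.length - 2))

-- ===== PORT B =====
-- the same dict, but Source B looks it up with CHARACTER pairs (c, rout[-1]); same insertion order
def mergerRulesC (c d : Char) : Option String :=
  if (c,d) = ('a','u') then some "o" else if (c,d) = ('a','i') then some "e"
  else if (c,d) = ('u','a') then some "wa" else if (c,d) = ('u','i') then some "wi"
  else if (c,d) = ('u','e') then some "we" else if (c,d) = ('u','o') then some "wo"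
  else if (c,d) = ('i','a') then some "ya" else if (c,d) = ('i','u') then some "yu"
  else if (c,d) = ('i','e') then some "ye" else if (c,d) = ('i','o') then some "yo"
  else if (c,d) = ('a','a') then some "A" else if (c,d) = ('i','i') then some "I"
  else if (c,d) = ('u','u') then some "U" else if (c,d) = ('e','e') then some "E"
  else if (c,d) = ('o','o') then some "O" else none

-- one iteration of Source B's for body; python's rout holds the result's chars reversed, so its
-- LAST element is this Lean list's HEAD: rout.append c = cons, rout[-1] = head, and
-- rout[-1:] = reversed(m) = drop the head and prepend m's chars in forward order
def stepB (rout : List Char) (c : Char) : List Char :=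
  match rout with
  | d :: rest =>
    (match mergerRulesC c d with
     | some m => m.toList ++ rest
     | none   => c :: d :: rest)
  | [] => [c]

-- ''.join(reversed(rout)) reads python's rout backwards = this Lean list forwards
def apply_merger_alt (path : String) : String :=
  String.ofList (path.toList.reverse.foldl stepB [])

-- ===== PRECONDITION & SPEC =====
def Spec_apply_merger (path : String) (out : String) : Prop := out = apply_merger_alt path
instance (path : String) (out : String) : Decidable (Spec_apply_merger path out) := by unfold Spec_apply_merger; infer_instance

-- ===== CLAIM (what is proved, stated in full; the proofs are below) =====
def Claim_equal_apply_merger : Prop := ∀ (path : String), Dom_apply_merger path → Spec_apply_merger path (apply_merger path)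

-- ===== LEMMAS AND PROOFS =====

-- A's algorithm, reformulated as a right-to-left stack of SEGMENTS (proof-side middle layer):
-- one step pushes the char or merges it with the top segment
def segStep (stack : List String) (c : Char) : List String :=
  match stack with
  | s :: rest =>
    (match mergerRules (String.singleton c, s) with
     | some m => m :: rest
     | none   => String.singleton c :: stack)
  | [] => [String.singleton c]

def loopB (cs : List Char) : List String := cs.foldr (fun c st => segStep st c) []

lemma loopB_cons (c : Char) (cs : List Char) : loopB (c :: cs) = segStep (loopB cs) c := rfl

lemma loopB_ne_nil (cs : List Char) (h : cs ≠ []) : loopB cs ≠ [] := by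
  cases cs with
  | nil => exact absurd rfl h
  | cons c cs =>
    rw [loopB_cons]
    cases loopB cs with
    | nil => simp [segStep]
    | cons s rest =>
      simp only [segStep]
      cases mergerRules (String.singleton c, s) <;> simp

-- the body of A's loop at index j transforms the invariant state for j into the one for j-1
lemma stepA_state (cs : List Char) (j : Nat) (h : j + 2 ≤ cs.length) :
    stepA ((cs.map String.singleton).take (j+1) ++ loopB (cs.drop (j+1))) j
      = (cs.map String.singleton).take j ++ loopB (cs.drop j) := by
  have hj1 : j + 1 < cs.length := by omega
  have hj : j < cs.length := by omega
  have hM : (cs.map String.singleton).length = cs.length := by simp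
  obtain ⟨t, ts, hT⟩ := List.exists_cons_of_ne_nil
    (loopB_ne_nil (cs.drop (j+1)) (by simp [List.drop_eq_nil_iff]; omega))
  have hlenA : ((cs.map String.singleton).take (j+1)).length = j + 1 := by
    simp [List.length_take]; omega
  have hgetj : ((cs.map String.singleton).take (j+1) ++ (t :: ts)).getD j ""
      = String.singleton cs[j] := by
    rw [List.getD_eq_getElem?_getD, List.getElem?_append_left (by omega)]
    simp [hj]
  have hgetj1 : ((cs.map String.singleton).take (j+1) ++ (t :: ts)).getD (j+1) ""
      = t := by
    rw [List.getD_eq_getElem?_getD, List.getElem?_append_right (by omega), hlenA]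
    simp
  have htakeM : ((cs.map String.singleton).take (j+1) ++ (t :: ts)).take j
      = (cs.map String.singleton).take j := by
    rw [List.take_append_of_le_length (by omega), List.take_take]
    congr 1
    omega
  have hdropM : ((cs.map String.singleton).take (j+1) ++ (t :: ts)).drop (j+2) = ts := by
    rw [List.drop_append, List.drop_eq_nil_iff.mpr (by omega), hlenA]
    simp [show j + 2 - (j+1) = 1 by omega]
  have htakes : (cs.map String.singleton).take (j+1)
      = (cs.map String.singleton).take j ++ [String.singleton cs[j]] := by
    rw [List.take_add_one]
    simp [List.getElem?_eq_getElem (show j < (cs.map String.singleton).length by omega)]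
  have hdropj : cs.drop j = cs[j] :: cs.drop (j+1) := List.drop_eq_getElem_cons hj
  rw [hT]
  simp only [stepA]
  rw [hgetj, hgetj1, hdropj, loopB_cons, hT]
  simp only [segStep]
  cases hmr : mergerRules (String.singleton cs[j], t) with
  | some m =>
    rw [htakeM, hdropM]
    simp
  | none =>
    rw [htakes]
    simp

-- running A's loop from index i down on the invariant state yields the full segment stack
lemma loopA_inv (cs : List Char) (i : Nat) (h : i + 2 ≤ cs.length) :
    loopA ((cs.map String.singleton).take (i+1) ++ loopB (cs.drop (i+1))) i = loopB cs := by
  induction i with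
  | zero =>
    show stepA _ 0 = _
    rw [stepA_state cs 0 h]
    simp
  | succ i ih =>
    show loopA (stepA _ (i+1)) i = _
    rw [stepA_state cs (i+1) h, ih (by omega)]

-- the initial state of A's loop is the invariant state for index length-2
lemma init_state (cs : List Char) (h : 2 ≤ cs.length) :
    cs.map String.singleton
      = (cs.map String.singleton).take (cs.length - 1) ++ loopB (cs.drop (cs.length - 1)) := by
  have hlt : cs.length - 1 < cs.length := by omega
  have hdrop : cs.drop (cs.length - 1) = [cs[cs.length - 1]] := by
    rw [List.drop_eq_getElem_cons hlt, List.drop_eq_nil_iff.mpr (by omega)]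
  rw [hdrop, show loopB [cs[cs.length - 1]] = [String.singleton cs[cs.length - 1]] from rfl]
  conv_lhs => rw [← List.take_append_drop (cs.length - 1) (cs.map String.singleton)]
  congr 1
  rw [← List.map_drop, hdrop]
  rfl

-- ===== bridging the segment stack to B's character list =====

-- the character content of a segment stack
def chars (st : List String) : List Char := (st.map String.toList).flatten

-- B's fold written right-to-left over the original character list
def foldC (cs : List Char) : List Char := cs.foldr (fun c st => stepB st c) []

-- every segment the stack ever holds: a single char, or a two-char rule output 'w…'/'y…'
def okSeg (s : String) : Prop :=
  s.toList.length = 1 ∨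
    (s.toList.length = 2 ∧ (s.toList.head? = some 'w' ∨ s.toList.head? = some 'y'))

lemma singleton_eq_lit (c d : Char) : String.singleton c = String.singleton d ↔ c = d := by
  constructor
  · intro h; have := congrArg String.toList h; simpa using this
  · intro h; subst h; rfl

-- the two dict encodings agree on pairs of single characters
lemma rules_agree (c d : Char) :
    mergerRules (String.singleton c, String.singleton d) = mergerRulesC c d := by
  simp only [mergerRules, mergerRulesC, Prod.ext_iff,
    show ("a" : String) = String.singleton 'a' from rfl,
    show ("u" : String) = String.singleton 'u' from rfl,
    show ("i" : String) = String.singleton 'i' from rfl,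
    show ("e" : String) = String.singleton 'e' from rfl,
    show ("o" : String) = String.singleton 'o' from rfl,
    singleton_eq_lit]

-- the string-keyed dict never matches a multi-char second component
lemma rules_none_long (c : Char) (s : String) (x y : Char) (ys : List Char)
    (h : s.toList = x :: y :: ys) : mergerRules (String.singleton c, s) = none := by
  have hs : ∀ (e : Char), s ≠ String.singleton e := by
    intro e he; subst he; simp at h
  simp only [mergerRules, Prod.ext_iff,
    show ("u" : String) = String.singleton 'u' from rfl,
    show ("i" : String) = String.singleton 'i' from rfl,
    show ("a" : String) = String.singleton 'a' from rfl,
    show ("e" : String) = String.singleton 'e' from rfl,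
    show ("o" : String) = String.singleton 'o' from rfl]
  simp [hs]

-- the char-keyed dict never matches 'w' or 'y' as second component
lemma rulesC_w (c : Char) : mergerRulesC c 'w' = none := by
  simp [mergerRulesC, Prod.ext_iff]

lemma rulesC_y (c : Char) : mergerRulesC c 'y' = none := by
  simp [mergerRulesC, Prod.ext_iff]

-- every rule output is an admissible segment
lemma rules_output_ok (c d : Char) (m : String) (h : mergerRulesC c d = some m) : okSeg m := by
  unfold mergerRulesC at h
  by_cases h1 : (c, d) = ('a', 'u')
  · rw [if_pos h1] at h; injection h with h; subst h; unfold okSeg; decide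
  rw [if_neg h1] at h
  by_cases h2 : (c, d) = ('a', 'i')
  · rw [if_pos h2] at h; injection h with h; subst h; unfold okSeg; decide
  rw [if_neg h2] at h
  by_cases h3 : (c, d) = ('u', 'a')
  · rw [if_pos h3] at h; injection h with h; subst h; unfold okSeg; decide
  rw [if_neg h3] at h
  by_cases h4 : (c, d) = ('u', 'i')
  · rw [if_pos h4] at h; injection h with h; subst h; unfold okSeg; decide
  rw [if_neg h4] at h
  by_cases h5 : (c, d) = ('u', 'e')
  · rw [if_pos h5] at h; injection h with h; subst h; unfold okSeg; decide
  rw [if_neg h5] at h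
  by_cases h6 : (c, d) = ('u', 'o')
  · rw [if_pos h6] at h; injection h with h; subst h; unfold okSeg; decide
  rw [if_neg h6] at h
  by_cases h7 : (c, d) = ('i', 'a')
  · rw [if_pos h7] at h; injection h with h; subst h; unfold okSeg; decide
  rw [if_neg h7] at h
  by_cases h8 : (c, d) = ('i', 'u')
  · rw [if_pos h8] at h; injection h with h; subst h; unfold okSeg; decide
  rw [if_neg h8] at h
  by_cases h9 : (c, d) = ('i', 'e')
  · rw [if_pos h9] at h; injection h with h; subst h; unfold okSeg; decide
  rw [if_neg h9] at h
  by_cases h10 : (c, d) = ('i', 'o')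
  · rw [if_pos h10] at h; injection h with h; subst h; unfold okSeg; decide
  rw [if_neg h10] at h
  by_cases h11 : (c, d) = ('a', 'a')
  · rw [if_pos h11] at h; injection h with h; subst h; unfold okSeg; decide
  rw [if_neg h11] at h
  by_cases h12 : (c, d) = ('i', 'i')
  · rw [if_pos h12] at h; injection h with h; subst h; unfold okSeg; decide
  rw [if_neg h12] at h
  by_cases h13 : (c, d) = ('u', 'u')
  · rw [if_pos h13] at h; injection h with h; subst h; unfold okSeg; decide
  rw [if_neg h13] at h
  by_cases h14 : (c, d) = ('e', 'e')
  · rw [if_pos h14] at h; injection h with h; subst h; unfold okSeg; decide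
  rw [if_neg h14] at h
  by_cases h15 : (c, d) = ('o', 'o')
  · rw [if_pos h15] at h; injection h with h; subst h; unfold okSeg; decide
  rw [if_neg h15] at h
  simp at h

lemma okSeg_singleton (c : Char) : okSeg (String.singleton c) := by
  unfold okSeg; simp

lemma seg_eq_singleton (s : String) (d : Char) (h : s.toList = [d]) :
    s = String.singleton d := by
  have := congrArg String.ofList h; simpa using this

-- one step of the segment stack has the character content of one step of B's char list
lemma step_bridge (st : List String) (c : Char) (hok : ∀ s ∈ st, okSeg s) :
    chars (segStep st c) = stepB (chars st) c ∧ ∀ s ∈ segStep st c, okSeg s := by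
  cases st with
  | nil =>
    refine ⟨by simp [chars, segStep, stepB], ?_⟩
    intro s hs
    simp [segStep] at hs
    subst hs
    exact okSeg_singleton c
  | cons s rest =>
    have hok_s : okSeg s := hok s (by simp)
    have hok_rest : ∀ t ∈ rest, okSeg t := fun t ht => hok t (by simp [ht])
    have hchars : chars (s :: rest) = s.toList ++ chars rest := by simp [chars]
    rcases hok_s with h1 | ⟨h2, hw⟩
    · -- single-char segment
      obtain ⟨d, hts⟩ := List.length_eq_one_iff.mp h1
      have hseq : s = String.singleton d := seg_eq_singleton s d hts
      simp only [segStep, hseq, rules_agree]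
      have hch : chars (String.singleton d :: rest) = d :: chars rest := by
        simp [chars]
      cases hmr : mergerRulesC c d with
      | some m =>
        refine ⟨?_, ?_⟩
        · show chars (m :: rest) = stepB (chars (String.singleton d :: rest)) c
          rw [hch]
          simp [stepB, hmr, chars]
        · intro t ht
          simp at ht
          rcases ht with rfl | ht
          · exact rules_output_ok c d t hmr
          · exact hok_rest t ht
      | none =>
        refine ⟨?_, ?_⟩
        · show chars (String.singleton c :: String.singleton d :: rest)
              = stepB (chars (String.singleton d :: rest)) c
          rw [hch]
          simp [stepB, hmr, chars]
        · intro t ht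
          simp at ht
          rcases ht with rfl | rfl | ht
          · exact okSeg_singleton c
          · exact okSeg_singleton d
          · exact hok_rest t ht
    · -- two-char segment starting with 'w' or 'y'
      obtain ⟨x, y, hts⟩ : ∃ x y, s.toList = [x, y] := by
        match hl : s.toList, h2 with
        | [x, y], _ => exact ⟨x, y, rfl⟩
      have hx : x = 'w' ∨ x = 'y' := by
        rw [hts] at hw; simpa using hw
      have hnone := rules_none_long c s x y [] hts
      have hcnone : mergerRulesC c x = none := by
        rcases hx with rfl | rfl
        · exact rulesC_w c
        · exact rulesC_y c
      refine ⟨?_, ?_⟩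
      · simp only [segStep, hnone]
        rw [show chars (String.singleton c :: s :: rest) = c :: (s.toList ++ chars rest) by
              simp [chars], hchars, hts]
        simp [stepB, hcnone]
      · intro t ht
        simp [segStep, hnone] at ht
        rcases ht with rfl | rfl | ht
        · exact okSeg_singleton c
        · exact Or.inr ⟨by rw [hts]; rfl, by rw [hts]; simpa using hx⟩
        · exact hok_rest t ht

-- over any character list, the segment stack's content is exactly B's char list
lemma loopB_bridge (cs : List Char) :
    chars (loopB cs) = foldC cs ∧ ∀ s ∈ loopB cs, okSeg s := by
  induction cs with
  | nil => exact ⟨rfl, by simp [loopB]⟩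
  | cons c cs ih =>
    rw [loopB_cons, show foldC (c :: cs) = stepB (foldC cs) c from rfl]
    obtain ⟨h1, h2⟩ := ih
    obtain ⟨g1, g2⟩ := step_bridge (loopB cs) c h2
    exact ⟨by rw [g1, h1], g2⟩

-- String.join of a stack is the string of its character content
lemma join_chars (st : List String) : String.join st = String.ofList (chars st) := by
  have h2 : (String.join st).toList = chars st := by simp [chars]
  calc String.join st = String.ofList (String.join st).toList := String.ofList_toList.symm
    _ = String.ofList (chars st) := by rw [h2]

lemma alt_eq_foldC (path : String) :
    apply_merger_alt path = String.ofList (foldC path.toList) := by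
  unfold apply_merger_alt foldC
  rw [List.foldl_reverse]

-- ===== VERDICT (by name: the statement is the Claim_ definition above) =====
theorem apply_merger_spec : Claim_equal_apply_merger := by
  intro path _
  unfold Spec_apply_merger
  rw [alt_eq_foldC, ← (loopB_bridge path.toList).1, ← join_chars]
  show String.join (if (path.toList.map String.singleton).length < 2
      then path.toList.map String.singleton
      else loopA (path.toList.map String.singleton) ((path.toList.map String.singleton).length - 2))
    = String.join (loopB path.toList)
  set cs := path.toList with hcs
  by_cases h2 : 2 ≤ cs.length
  · rw [if_neg (by simp only [List.length_map]; omega)]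
    congr 1
    have hi1 : cs.length - 2 + 1 = cs.length - 1 := by omega
    have hinv := loopA_inv cs (cs.length - 2) (by omega)
    rw [hi1, ← init_state cs h2] at hinv
    simp only [List.length_map]
    exact hinv
  · rw [if_pos (by simp only [List.length_map]; omega)]
    congr 1
    match cs, h2 with
    | [], _ => rfl
    | [c], _ => rfl
    | c :: d :: rest, h2 => exact absurd (by simp) h2
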